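-- pv_equiv track=rewrite | github.com/DebiEYY/Sungeet_- | chords/chords_algo.py | adjust_note_to_range
-- ===== SOURCE A (Python) =====
-- def adjust_note_to_range(note, min_range=60, max_range=71):
--     if note == 0:
--         return note
--     while note < min_range:
--         note += 12
--     while note > max_range:
--         note -= 12
--     return note
-- ===== SOURCE B (Python) =====
-- def adjust_note_to_range(note, min_range=60, max_range=71):
--     if note == 0:
--         return note
--     u = note if note >= min_range else min_range + (note - min_range) % 12
--     return u if u <= max_range else max_range - (max_range - u) % 12
-- ===== Notes on version B (the rewrite author's own statement) =====
-- stated objective: faster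
-- what changed: Replaces the two while-loops with a branchless-style closed form using Python's nonnegative modulo: the up-pass becomes min_range + (note - min_range) % 12 and the down-pass becomes max_range - (max_range - u) % 12, computed as two expressions with no loops or repeated addition.
import Mathlib
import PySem

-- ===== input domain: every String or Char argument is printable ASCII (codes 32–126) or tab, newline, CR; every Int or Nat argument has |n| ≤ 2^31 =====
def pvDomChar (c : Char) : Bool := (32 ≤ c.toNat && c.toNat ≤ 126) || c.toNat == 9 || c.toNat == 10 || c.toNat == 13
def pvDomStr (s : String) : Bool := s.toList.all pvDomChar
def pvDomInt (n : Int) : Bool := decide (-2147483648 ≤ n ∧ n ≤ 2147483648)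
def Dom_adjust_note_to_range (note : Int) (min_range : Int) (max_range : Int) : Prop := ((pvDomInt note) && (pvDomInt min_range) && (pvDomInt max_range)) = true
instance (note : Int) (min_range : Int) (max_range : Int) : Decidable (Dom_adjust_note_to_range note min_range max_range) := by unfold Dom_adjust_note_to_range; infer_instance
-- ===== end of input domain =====

-- ===== PORT A =====
-- one honest line: B replaces A's two while-loops by one modular-arithmetic expression per direction (O(1) instead of O(distance/12))
-- while note < min_range: note += 12
def pvUpLoop (note : Int) (min_range : Int) : Int :=
  if note < min_range then pvUpLoop (note + 12) min_range else note
  termination_by (min_range - note).toNat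
  decreasing_by omega

-- while note > max_range: note -= 12
def pvDownLoop (note : Int) (max_range : Int) : Int :=
  if note > max_range then pvDownLoop (note - 12) max_range else note
  termination_by (note - max_range).toNat
  decreasing_by omega

def adjust_note_to_range (note : Int) (min_range : Int) (max_range : Int) : Int :=
  if note = 0 then note
  else pvDownLoop (pvUpLoop note min_range) max_range

-- ===== PORT B =====
-- u = note if note >= min_range else min_range + (note - min_range) % 12
-- return u if u <= max_range else max_range - (max_range - u) % 12
def adjust_note_to_range_alt (note : Int) (min_range : Int) (max_range : Int) : Int :=
  if note = 0 then note
  else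
    let u := if note ≥ min_range then note
             else min_range + PySem.Int.mod (note - min_range) 12
    if u ≤ max_range then u
    else max_range - PySem.Int.mod (max_range - u) 12

-- ===== PRECONDITION & SPEC =====
def Spec_adjust_note_to_range (note : Int) (min_range : Int) (max_range : Int) (out : Int) : Prop := out = adjust_note_to_range_alt note min_range max_range
instance (note : Int) (min_range : Int) (max_range : Int) (out : Int) : Decidable (Spec_adjust_note_to_range note min_range max_range out) := by unfold Spec_adjust_note_to_range; infer_instance

-- ===== CLAIM =====
def Claim_equal_adjust_note_to_range : Prop := ∀ (note : Int) (min_range : Int) (max_range : Int), Dom_adjust_note_to_range note min_range max_range → Spec_adjust_note_to_range note min_range max_range (adjust_note_to_range note min_range max_range)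

-- ===== LEMMAS AND PROOFS =====
theorem pvUpLoop_mod (note min_range : Int) :
    pvUpLoop note min_range =
      if note ≥ min_range then note
      else min_range + PySem.Int.mod (note - min_range) 12 := by
  fun_induction pvUpLoop note min_range with
  | case1 note hlt ih =>
      rw [ih]
      simp only [PySem.Int.mod_eq_emod_of_pos (by omega : (0:Int) < 12)]
      split_ifs <;> omega
  | case2 note hnot => simp [not_lt] at hnot; simp [hnot]

theorem pvDownLoop_mod (u max_range : Int) :
    pvDownLoop u max_range =
      if u ≤ max_range then u
      else max_range - PySem.Int.mod (max_range - u) 12 := by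
  fun_induction pvDownLoop u max_range with
  | case1 u hgt ih =>
      rw [ih]
      simp only [PySem.Int.mod_eq_emod_of_pos (by omega : (0:Int) < 12)]
      split_ifs <;> omega
  | case2 u hnot => simp [not_lt] at hnot; simp [hnot]

-- ===== VERDICT =====
theorem adjust_note_to_range_spec : Claim_equal_adjust_note_to_range := by
  intro note m M _
  unfold Spec_adjust_note_to_range adjust_note_to_range adjust_note_to_range_alt
  by_cases h : note = 0
  · simp [h]
  · simp only [if_neg h]
    rw [pvUpLoop_mod, pvDownLoop_mod]
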